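-- pv_equiv track=rewrite | github.com/Trappeew1ch/RETRY | script.py | parse_file_structure
-- ===== SOURCE A (Python) =====
-- from typing import List, Dict, Any, Optional, Tuple, NamedTuple  # Добавьте NamedTuple здесь
-- from typing import List, Dict, Any, Optional
--
-- def parse_file_structure(code: str) -> List[Tuple[str, str]]:
--     files = []
--     current_file = ""
--     current_content = []
--
--     for line in code.split('\n'):
--         if line.startswith("# File: "):
--             if current_file and current_content:
--                 files.append((current_file, '\n'.join(current_content)))
--             current_file = line[7:].strip()
--             current_content = []
--         else:
--             current_content.append(line)
--
--     if current_file and current_content: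
--         files.append((current_file, '\n'.join(current_content)))
--
--     return files
-- ===== SOURCE B (Python) =====
-- def parse_file_structure(code: str):
--     """Chunk decomposition: treat the lines as a stack and consume one
--     header-plus-body chunk per outer iteration."""
--     HDR = "# File: "
--     rev = code.split('\n')[::-1]          # stack; top (= rev[-1]) is the next line
--     while rev and not rev[-1].startswith(HDR):
--         rev.pop()                          # discard everything before the first header
--     files = []
--     while rev:
--         name = rev.pop()[7:].strip()       # header line
--         body = []
--         while rev and not rev[-1].startswith(HDR):
--             body.append(rev.pop())
--         if name and body:
--             files.append((name, '\n'.join(body)))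
--     return files
-- ===== Notes on version B (the rewrite author's own statement) =====
-- stated objective: alternative
-- what changed: Replaced A's single-pass state machine (current_file/current_content accumulators flushed on each header and at the end) by a chunk decomposition: skip lines before the first header, then repeatedly consume one header plus its body span from a line stack, emitting the pair immediately.
import Mathlib
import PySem

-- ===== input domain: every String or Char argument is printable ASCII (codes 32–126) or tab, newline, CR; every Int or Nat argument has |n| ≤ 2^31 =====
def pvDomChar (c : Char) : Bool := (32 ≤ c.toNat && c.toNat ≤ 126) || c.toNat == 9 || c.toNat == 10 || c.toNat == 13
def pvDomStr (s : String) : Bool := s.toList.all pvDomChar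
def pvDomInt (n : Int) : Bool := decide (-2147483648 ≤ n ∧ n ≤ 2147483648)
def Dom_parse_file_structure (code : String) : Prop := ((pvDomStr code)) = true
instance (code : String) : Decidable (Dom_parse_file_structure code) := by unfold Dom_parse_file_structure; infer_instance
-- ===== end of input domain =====

-- B replaces A's flush-on-header state machine by a chunk-at-a-time scan over the lines (alternative decomposition, same cost).

-- ===== PORT A =====
-- 'line.startswith("# File: ")' (shared by both ports)
def pfsIsHeader (line : List Char) : Bool := PySem.Chars.startswith line "# File: ".toList

-- the repeated 'if current_file and current_content: files.append((current_file, "\n".join(current_content)))'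
def pfsAFlush (st : List (String × String) × List Char × List (List Char)) : List (String × String) :=
  if st.2.1 ≠ [] ∧ st.2.2 ≠ [] then
    st.1 ++ [(String.ofList st.2.1, String.ofList (PySem.Chars.join ['\n'] st.2.2))]
  else st.1

-- the loop body; state = (files, current_file, current_content); line[7:] on a char list = List.drop 7 (nonnegative start, exact)
def pfsAStep (st : List (String × String) × List Char × List (List Char)) (line : List Char) :
    List (String × String) × List Char × List (List Char) :=
  if pfsIsHeader line then
    (pfsAFlush st, PySem.Chars.strip (line.drop 7), [])
  else
    (st.1, st.2.1, st.2.2 ++ [line])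

def parse_file_structure (code : String) : List (String × String) :=
  pfsAFlush ((PySem.Chars.splitOn code.toList ['\n']).foldl pfsAStep ([], [], []))

-- ===== PORT B =====
-- the Python keeps the reversed line list as a stack whose top rev[-1] is the next line;
-- here the stack is the list of remaining lines with its top as the head.

-- 'while rev and not rev[-1].startswith(HDR): rev.pop()'  (discard lines before the first header)
def pfsBSkip : List (List Char) → List (List Char)
  | [] => []
  | l :: rest => if pfsIsHeader l then l :: rest else pfsBSkip rest

-- the inner body-collecting while loop: returns (body, remaining stack)
def pfsBSpan : List (List Char) → List (List Char) × List (List Char)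
  | [] => ([], [])
  | l :: rest =>
    if pfsIsHeader l then ([], l :: rest)
    else
      let (b, r) := pfsBSpan rest
      (l :: b, r)

theorem pfsBSpan_snd_length_le (ls : List (List Char)) : (pfsBSpan ls).2.length ≤ ls.length := by
  induction ls with
  | nil => simp [pfsBSpan]
  | cons l rest ih =>
    simp only [pfsBSpan]
    split
    · simp
    · simpa using Nat.le_succ_of_le ih

-- the outer 'while rev:' loop
def pfsBLoop : List (List Char) → List (String × String) → List (String × String)
  | [], files => files
  | h :: rest, files =>
    let name := PySem.Chars.strip (h.drop 7)
    let body := (pfsBSpan rest).1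
    let r := (pfsBSpan rest).2
    let files' := if name ≠ [] ∧ body ≠ [] then
        files ++ [(String.ofList name, String.ofList (PySem.Chars.join ['\n'] body))]
      else files
    pfsBLoop r files'
  termination_by stack _ => stack.length
  decreasing_by exact Nat.lt_succ_of_le (pfsBSpan_snd_length_le rest)

def parse_file_structure_alt (code : String) : List (String × String) :=
  pfsBLoop (pfsBSkip (PySem.Chars.splitOn code.toList ['\n'])) []

-- ===== PRECONDITION & SPEC =====
def Spec_parse_file_structure (code : String) (out : List (String × String)) : Prop := out = parse_file_structure_alt code
instance (code : String) (out : List (String × String)) : Decidable (Spec_parse_file_structure code out) := by unfold Spec_parse_file_structure; infer_instance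

-- ===== CLAIM (what is proved, stated in full; the proofs are below) =====
def Claim_equal_parse_file_structure : Prop := ∀ (code : String), Dom_parse_file_structure code → Spec_parse_file_structure code (parse_file_structure code)

-- ===== LEMMAS AND PROOFS =====

theorem pfsBSpan_snd_eq_skip (ls : List (List Char)) : (pfsBSpan ls).2 = pfsBSkip ls := by
  induction ls with
  | nil => simp [pfsBSpan, pfsBSkip]
  | cons l rest ih =>
    simp only [pfsBSpan, pfsBSkip]
    split
    · rfl
    · simpa using ih

-- Main invariant: flushing the fold's final state equals continuing the chunk loop
-- with the current segment flushed into the accumulator.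
theorem pfs_main (lines : List (List Char)) :
    ∀ files cf cc,
      pfsAFlush (lines.foldl pfsAStep (files, cf, cc))
      = pfsBLoop (pfsBSpan lines).2 (pfsAFlush (files, cf, cc ++ (pfsBSpan lines).1)) := by
  induction lines with
  | nil => intro files cf cc; simp [pfsBSpan, pfsBLoop]
  | cons l rest ih =>
    intro files cf cc
    by_cases h : pfsIsHeader l = true
    · have hstep : pfsAStep (files, cf, cc) l
          = (pfsAFlush (files, cf, cc), PySem.Chars.strip (l.drop 7), []) := by
        simp [pfsAStep, pfsIsHeader] at h ⊢
        simp [h]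
      simp only [List.foldl_cons, hstep, pfsBSpan, h, if_pos]
      rw [ih]
      conv_rhs => rw [pfsBLoop]
      simp [pfsAFlush]
    · have hstep : pfsAStep (files, cf, cc) l = (files, cf, cc ++ [l]) := by
        simp [pfsAStep, pfsIsHeader] at h ⊢
        simp [h]
      simp only [List.foldl_cons, hstep, pfsBSpan, h]
      rw [ih]
      simp

-- ===== VERDICT (by name: the statement is the Claim_ definition above) =====
theorem parse_file_structure_spec : Claim_equal_parse_file_structure := by
  intro code _
  unfold Spec_parse_file_structure parse_file_structure parse_file_structure_alt
  rw [pfs_main _ [] [] []]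
  rw [pfsBSpan_snd_eq_skip]
  simp [pfsAFlush]
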